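-- pv_equiv track=rewrite | github.com/Rioran/breaking-badize | python/main.py | _enrich_word
-- ===== SOURCE A (Python) =====
-- ELEMENTS = {
--     'h', 'he', 'li', 'be', 'b', 'c', 'n', 'o', 'f', 'ne',
--     'na', 'mg', 'al', 'si', 'p', 's', 'cl', 'ar', 'k', 'ca',
--     'sc', 'ti', 'v', 'cr', 'mn', 'fe', 'co', 'ni', 'cu', 'zn',
--     'ga', 'ge', 'as', 'se', 'br', 'kr', 'rb', 'sr', 'y', 'zr',
--     'nb', 'mo', 'tc', 'ru', 'rh', 'pd', 'ag', 'cd', 'in', 'sn',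
--     'sb', 'te', 'i', 'xe', 'cs', 'ba', 'la', 'ce', 'pr', 'nd',
--     'pm', 'sm', 'eu', 'gd', 'tb', 'dy', 'ho', 'er', 'tm', 'yb',
--     'lu', 'hf', 'ta', 'w', 're', 'os', 'ir', 'pt', 'au', 'hg',
--     'tl', 'pb', 'bi', 'po', 'at', 'rn', 'fr', 'ra', 'ac', 'th',
--     'pa', 'u', 'np', 'pu', 'am', 'cm', 'bk', 'cf', 'es', 'fm',
--     'md', 'no', 'lr', 'rf', 'db', 'sg', 'bh', 'hs', 'mt', 'ds',
--     'rg', 'cn', 'nh', 'fl', 'mc', 'lv', 'ts', 'og',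
-- }
--
-- def _enrich_word(word: str) -> str:
--     chars = list(word)
--     previous_char = ''
--     for i, char in enumerate(chars):
--         if not char.isalpha():
--             previous_char = ''
--             continue
--         char_lower = char.lower()
--         if previous_char:
--             pair = previous_char + char_lower
--             if pair in ELEMENTS:
--                 chars[i-1] = f'[{pair.title()}]'
--                 chars[i] = previous_char = ''
--                 continue
--         if char_lower in ELEMENTS:
--             chars[i] = f'[{char.upper()}]'
--         previous_char = char_lower
--     result = ''.join(chars)
--     return result
-- ===== SOURCE B (Python) =====
-- ELEMENTS = {
--     'h', 'he', 'li', 'be', 'b', 'c', 'n', 'o', 'f', 'ne',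
--     'na', 'mg', 'al', 'si', 'p', 's', 'cl', 'ar', 'k', 'ca',
--     'sc', 'ti', 'v', 'cr', 'mn', 'fe', 'co', 'ni', 'cu', 'zn',
--     'ga', 'ge', 'as', 'se', 'br', 'kr', 'rb', 'sr', 'y', 'zr',
--     'nb', 'mo', 'tc', 'ru', 'rh', 'pd', 'ag', 'cd', 'in', 'sn',
--     'sb', 'te', 'i', 'xe', 'cs', 'ba', 'la', 'ce', 'pr', 'nd',
--     'pm', 'sm', 'eu', 'gd', 'tb', 'dy', 'ho', 'er', 'tm', 'yb',
--     'lu', 'hf', 'ta', 'w', 're', 'os', 'ir', 'pt', 'au', 'hg',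
--     'tl', 'pb', 'bi', 'po', 'at', 'rn', 'fr', 'ra', 'ac', 'th',
--     'pa', 'u', 'np', 'pu', 'am', 'cm', 'bk', 'cf', 'es', 'fm',
--     'md', 'no', 'lr', 'rf', 'db', 'sg', 'bh', 'hs', 'mt', 'ds',
--     'rg', 'cn', 'nh', 'fl', 'mc', 'lv', 'ts', 'og',
-- }
--
-- def _enrich_word(word: str) -> str:
--     # Forward greedy scan: no look-back state, no in-place back-patching.
--     out = []
--     i = 0
--     n = len(word)
--     while i < n:
--         c = word[i]
--         if c.isalpha():
--             if i + 1 < n and (c + word[i + 1]).lower() in ELEMENTS: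
--                 out.append('[' + c.upper() + word[i + 1].lower() + ']')
--                 i += 2
--                 continue
--             if c.lower() in ELEMENTS:
--                 out.append('[' + c.upper() + ']')
--             else:
--                 out.append(c)
--         else:
--             out.append(c)
--         i += 1
--     return ''.join(out)
-- ===== Notes on version B (the rewrite author's own statement) =====
-- stated objective: simpler
-- what changed: Replaced A's enumerate loop with look-back state (previous_char) and in-place back-patching of chars[i-1]/chars[i] in a mutable list by a forward greedy scan with one-character lookahead that advances by 2 on a two-letter element and by 1 otherwise, appending finished pieces only.
import Mathlib
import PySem

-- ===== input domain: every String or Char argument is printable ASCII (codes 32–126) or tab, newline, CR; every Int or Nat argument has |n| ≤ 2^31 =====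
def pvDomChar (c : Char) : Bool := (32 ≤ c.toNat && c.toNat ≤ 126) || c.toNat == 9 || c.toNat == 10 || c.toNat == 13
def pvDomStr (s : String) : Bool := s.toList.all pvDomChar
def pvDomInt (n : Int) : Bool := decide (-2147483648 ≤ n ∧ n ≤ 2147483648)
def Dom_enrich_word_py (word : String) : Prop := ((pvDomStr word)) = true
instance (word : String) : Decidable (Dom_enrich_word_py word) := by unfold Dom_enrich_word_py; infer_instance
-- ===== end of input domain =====

-- B replaces A's look-back state and in-place back-patching of chars[i-1] by a forward greedy
-- scan with one-character lookahead that appends finished pieces only (objective: simpler).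

-- ===== PORT A =====

-- the ELEMENTS set, as lists of chars (each Python string is a List Char here)
def pvELEMENTS : PySem.Set (List Char) := PySem.Set.ofList (
  [ "h", "he", "li", "be", "b", "c", "n", "o", "f", "ne",
    "na", "mg", "al", "si", "p", "s", "cl", "ar", "k", "ca",
    "sc", "ti", "v", "cr", "mn", "fe", "co", "ni", "cu", "zn",
    "ga", "ge", "as", "se", "br", "kr", "rb", "sr", "y", "zr",
    "nb", "mo", "tc", "ru", "rh", "pd", "ag", "cd", "in", "sn",
    "sb", "te", "i", "xe", "cs", "ba", "la", "ce", "pr", "nd",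
    "pm", "sm", "eu", "gd", "tb", "dy", "ho", "er", "tm", "yb",
    "lu", "hf", "ta", "w", "re", "os", "ir", "pt", "au", "hg",
    "tl", "pb", "bi", "po", "at", "rn", "fr", "ra", "ac", "th",
    "pa", "u", "np", "pu", "am", "cm", "bk", "cf", "es", "fm",
    "md", "no", "lr", "rf", "db", "sg", "bh", "hs", "mt", "ds",
    "rg", "cn", "nh", "fl", "mc", "lv", "ts", "og" ].map String.toList)

-- hand port of Python str.title() (PySem has none): a letter is uppercased iff the previous
-- character is not cased; exact on ASCII, where 'cased' = isalpha
def pyTitle : List Char → Bool → List Char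
  | [], _ => []
  | c :: rest, prevCased =>
      (if PySem.Chars.isalpha c then
        (if prevCased then PySem.Chars.lowerChar c else PySem.Chars.upperChar c)
      else c) :: pyTitle rest (PySem.Chars.isalpha c)

-- the body of A's for-loop; state = (chars, previous_char); Python's nested
-- 'if previous_char: … if pair in ELEMENTS:' is the single conjunction here (same fall-through)
def aStep (st : List (List Char) × List Char) (p : Int × List Char) : List (List Char) × List Char :=
  let chars := st.1
  let prev := st.2
  let i := p.1
  let ch := p.2
  if PySem.Chars.strIsalpha ch = false then (chars, [])   -- not char.isalpha(): previous_char = ''; continue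
  else
    let cl := PySem.Chars.lower ch
    if prev ≠ [] ∧ (prev ++ cl) ∈ pvELEMENTS then
      -- chars[i-1] = '[' + pair.title() + ']'; chars[i] = previous_char = ''
      (PySem.List.pySetD (PySem.List.pySetD chars (i - 1) ('[' :: (pyTitle (prev ++ cl) false ++ [']']))) i [], [])
    else
      -- if char_lower in ELEMENTS: chars[i] = '[' + char.upper() + ']';  previous_char = char_lower
      (if cl ∈ pvELEMENTS then PySem.List.pySetD chars i ('[' :: (PySem.Chars.upper ch ++ [']'])) else chars, cl)

-- for-loop over enumerate(chars): mutations at step i touch indices ≤ i only, and enumerate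
-- reads chars[i] before step i runs, so folding over the enumerate of the INITIAL list is exact
def enrich_word_py (word : String) : String :=
  let chars := word.toList.map (fun c => [c])
  let fin := (PySem.List.enumerate chars).foldl aStep (chars, [])
  String.ofList fin.1.flatten   -- ''.join(chars) = concatenation of the cells

-- ===== PORT B =====

-- piece emitted for a lone letter c
def bCell (c : Char) : List Char :=
  if [PySem.Chars.lowerChar c] ∈ pvELEMENTS then ['[', PySem.Chars.upperChar c, ']'] else [c]

-- Source B's while-loop: i advances by 2 (pair) or 1, ported as recursion dropping 2 or 1 chars
def bGo : List Char → List (List Char)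
  | [] => []
  | c :: [] => if PySem.Chars.isalpha c then [bCell c] else [[c]]
  | c :: d :: rest =>
      if PySem.Chars.isalpha c then
        if [PySem.Chars.lowerChar c, PySem.Chars.lowerChar d] ∈ pvELEMENTS then
          ['[', PySem.Chars.upperChar c, PySem.Chars.lowerChar d, ']'] :: bGo rest
        else bCell c :: bGo (d :: rest)
      else [c] :: bGo (d :: rest)

def enrich_word_py_alt (word : String) : String :=
  String.ofList (bGo word.toList).flatten   -- ''.join(out)

-- ===== PRECONDITION & SPEC =====
def Spec_enrich_word_py (word : String) (out : String) : Prop := out = enrich_word_py_alt word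
instance (word : String) (out : String) : Decidable (Spec_enrich_word_py word out) := by unfold Spec_enrich_word_py; infer_instance

-- ===== CLAIM (what is proved, stated in full; the proofs are below) =====
def Claim_equal_enrich_word_py : Prop := ∀ (word : String), Dom_enrich_word_py word → Spec_enrich_word_py word (enrich_word_py word)

-- ===== LEMMAS AND PROOFS =====

def charOK (c : Char) : Bool :=
  if PySem.Chars.isalpha c then
    PySem.Chars.isalpha (PySem.Chars.lowerChar c) &&
    (PySem.Chars.upperChar (PySem.Chars.lowerChar c) == PySem.Chars.upperChar c) &&
    (PySem.Chars.lowerChar (PySem.Chars.lowerChar c) == PySem.Chars.lowerChar c)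
  else PySem.Chars.lowerChar c == c

theorem charOK_of_dom (c : Char) (h : pvDomChar c = true) : charOK c = true := by
  have h2 : ∀ n : Fin 127, charOK (Char.ofNat n.val) = true := by decide
  have hle : c.toNat < 127 := by
    have h' : ((32 ≤ c.toNat ∧ c.toNat ≤ 126 ∨ c.toNat = 9) ∨ c.toNat = 10) ∨ c.toNat = 13 := by
      simpa [pvDomChar] using h
    omega
  have := h2 ⟨c.toNat, hle⟩
  simpa [Char.ofNat_toNat] using this

set_option maxRecDepth 10000 in
theorem pvE_alpha : ∀ p ∈ pvELEMENTS, p.all PySem.Chars.isalpha = true := by decide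

theorem set_mid {α : Type} (c : List α) (x : α) (t : List α) (v : α) :
    (c ++ x :: t).set c.length v = c ++ v :: t := by
  induction c with
  | nil => simp
  | cons y ys ih => simp [List.set_cons_succ, ih]
theorem lower_alpha (c : Char) (hd : pvDomChar c = true) (h : PySem.Chars.isalpha c = true) :
    PySem.Chars.isalpha (PySem.Chars.lowerChar c) = true := by
  have := charOK_of_dom c hd; simp [charOK, h] at this; exact this.1.1
theorem upper_lower (c : Char) (hd : pvDomChar c = true) (h : PySem.Chars.isalpha c = true) :
    PySem.Chars.upperChar (PySem.Chars.lowerChar c) = PySem.Chars.upperChar c := by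
  have := charOK_of_dom c hd; simp [charOK, h] at this; exact this.1.2
theorem lower_lower (c : Char) (hd : pvDomChar c = true) (h : PySem.Chars.isalpha c = true) :
    PySem.Chars.lowerChar (PySem.Chars.lowerChar c) = PySem.Chars.lowerChar c := by
  have := charOK_of_dom c hd; simp [charOK, h] at this; exact this.2
theorem lower_nonalpha (c : Char) (hd : pvDomChar c = true) (h : PySem.Chars.isalpha c = false) :
    PySem.Chars.lowerChar c = c := by
  have := charOK_of_dom c hd; simp [charOK, h] at this; exact this

theorem pair_mem_alpha {u v : Char} (h : [u, v] ∈ pvELEMENTS) : PySem.Chars.isalpha v = true := by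
  have := pvE_alpha _ h; simp at this; exact this.2

theorem bGo_nonalpha (a : Char) (rest : List Char) (h : PySem.Chars.isalpha a = false) :
    bGo (a :: rest) = [a] :: bGo rest := by
  cases rest <;> simp [bGo, h]

theorem run_main (l : List Char) : ∀ (c : List (List Char)) (x? : Option Char) (s : Int),
    (∀ x ∈ x?, PySem.Chars.isalpha x = true ∧ pvDomChar x = true) →
    (∀ a ∈ l, pvDomChar a = true) →
    s = (c.length : Int) + (x?.elim 0 fun _ => 1) →
    ((PySem.List.enumerate (l.map fun a => [a]) s).foldl aStep
        ((c ++ x?.elim [] fun x => [bCell x]) ++ l.map fun a => [a],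
         x?.elim [] fun x => [PySem.Chars.lowerChar x])).1.flatten
      = c.flatten ++ (x?.elim (bGo l) fun x => bGo (x :: l)).flatten := by
  induction l with
  | nil =>
    intro c x? s hx hd hs
    rcases x? with _ | x
    · simp [bGo]
    · have hXa := (hx x rfl).1
      simp [bGo, hXa]
  | cons a rest ih =>
    intro c x? s hx hd hs
    have hda : pvDomChar a = true := hd a (List.mem_cons_self ..)
    have hdrest : ∀ b ∈ rest, pvDomChar b = true := fun b hb => hd b (List.mem_cons_of_mem _ hb)
    rw [List.map_cons, PySem.List.enumerate_cons, List.foldl_cons]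
    rcases x? with _ | x <;>
      simp only [Option.elim_none, Option.elim_some, List.append_nil, Int.add_zero] at hs ⊢ <;>
      subst hs
    · -- clean state
      by_cases hA : PySem.Chars.isalpha a
      · -- alpha, prev empty: single-element handling, become dirty
        have step : aStep (c ++ [a] :: rest.map fun b => [b], []) ((c.length : Int), [a])
            = ((c ++ [bCell a]) ++ rest.map fun b => [b], [PySem.Chars.lowerChar a]) := by
          by_cases hm : [PySem.Chars.lowerChar a] ∈ pvELEMENTS <;>
            simp [aStep, PySem.Chars.strIsalpha, hA, PySem.Chars.lower, PySem.Chars.upper, hm,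
              bCell, set_mid]
        rw [step]
        have := ih c (some a) ((c.length : Int) + 1) (by simp [hA, hda]) hdrest (by simp)
        simp only [Option.elim_none, Option.elim_some, List.append_nil] at this
        rw [this]
      · -- non-alpha: previous_char reset, char kept
        have hA' : PySem.Chars.isalpha a = false := by simpa using hA
        have step : aStep (c ++ [a] :: rest.map fun b => [b], []) ((c.length : Int), [a])
            = ((c ++ [[a]]) ++ rest.map fun b => [b], []) := by
          simp [aStep, PySem.Chars.strIsalpha, hA']
        rw [step]
        have := ih (c ++ [[a]]) none ((c.length : Int) + 1) (by simp) hdrest (by simp)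
        simp only [Option.elim_none, Option.elim_some, List.append_nil] at this
        rw [this]
        simp [bGo_nonalpha a rest hA']
    · -- dirty state: pending cell for x
      have hXa := (hx x rfl).1
      have hXd := (hx x rfl).2
      by_cases hA : PySem.Chars.isalpha a
      · by_cases hp : [PySem.Chars.lowerChar x, PySem.Chars.lowerChar a] ∈ pvELEMENTS
        · -- pair match: back-patch chars[i-1], blank chars[i]
          have htitle : pyTitle [PySem.Chars.lowerChar x, PySem.Chars.lowerChar a] false
              = [PySem.Chars.upperChar x, PySem.Chars.lowerChar a] := by
            simp [pyTitle, lower_alpha x hXd hXa, lower_alpha a hda hA,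
              upper_lower x hXd hXa, lower_lower a hda hA]
          have step : aStep ((c ++ [bCell x]) ++ [a] :: rest.map fun b => [b], [PySem.Chars.lowerChar x]) ((c.length : Int) + 1, [a])
              = ((c ++ [['[', PySem.Chars.upperChar x, PySem.Chars.lowerChar a, ']'], []]) ++ rest.map fun b => [b], []) := by
            have h1 : ((c.length : Int) + 1) - 1 = (c.length : Int) := by omega
            have h2 : ((c.length : Int) + 1) = ((c.length + 1 : Nat) : Int) := by push_cast; ring
            simp only [aStep, PySem.Chars.strIsalpha, PySem.Chars.lower, List.map_cons, List.map_nil,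
              List.all_cons, List.all_nil, hA, List.cons_append, List.nil_append]
            rw [if_neg (by simp [hA])]
            rw [if_pos (by simp; exact hp)]
            rw [h1, h2]
            simp only [PySem.List.pySetD_natCast, htitle, List.cons_append, List.nil_append]
            have e1 : (c ++ [bCell x]) ++ [a] :: rest.map (fun b => [b]) = c ++ bCell x :: [a] :: rest.map (fun b => [b]) := by simp
            rw [e1, set_mid]
            have e2 : c ++ ['[', PySem.Chars.upperChar x, PySem.Chars.lowerChar a, ']'] :: [a] :: rest.map (fun b => [b])
                = (c ++ [['[', PySem.Chars.upperChar x, PySem.Chars.lowerChar a, ']']]) ++ [a] :: rest.map (fun b => [b]) := by simp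
            have e3 : (c ++ [['[', PySem.Chars.upperChar x, PySem.Chars.lowerChar a, ']']]).length = c.length + 1 := by simp
            rw [e2, ← e3, set_mid]
            simp
          rw [step]
          have := ih (c ++ [['[', PySem.Chars.upperChar x, PySem.Chars.lowerChar a, ']'], []]) none ((c.length : Int) + 1 + 1) (by simp) hdrest (by simp only [List.length_append, List.length_cons, List.length_nil, Option.elim_none, Option.elim_some]; push_cast; omega)
          simp only [Option.elim_none, Option.elim_some, List.append_nil] at this
          rw [this]
          simp [bGo, hXa, hp]
        · -- no pair: single handling of a, pending becomes a
          have step : aStep ((c ++ [bCell x]) ++ [a] :: rest.map fun b => [b], [PySem.Chars.lowerChar x]) ((c.length : Int) + 1, [a])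
              = (((c ++ [bCell x]) ++ [bCell a]) ++ rest.map fun b => [b], [PySem.Chars.lowerChar a]) := by
            have h2 : ((c.length : Int) + 1) = (((c ++ [bCell x]).length : Nat) : Int) := by push_cast; simp
            simp only [aStep, PySem.Chars.strIsalpha, PySem.Chars.lower, PySem.Chars.upper,
              List.map_cons, List.map_nil, List.all_cons, List.all_nil, hA,
              List.cons_append, List.nil_append]
            rw [if_neg (by simp [hA])]
            rw [if_neg (fun h => hp h.2)]
            by_cases hm : [PySem.Chars.lowerChar a] ∈ pvELEMENTS
            · rw [if_pos (by simpa using hm), h2]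
              simp only [PySem.List.pySetD_natCast]
              rw [set_mid]
              simp [bCell, hm]
            · rw [if_neg (by simpa using hm)]
              simp [bCell, hm]
          rw [step]
          have := ih (c ++ [bCell x]) (some a) ((c.length : Int) + 1 + 1) (by simp [hA, hda]) hdrest (by simp only [List.length_append, List.length_cons, List.length_nil, Option.elim_none, Option.elim_some]; push_cast; omega)
          simp only [Option.elim_none, Option.elim_some, List.append_nil] at this
          rw [this]
          simp [bGo, hXa, hp]
      · -- a non-alpha: pair can't be an element; reset
        have hA' : PySem.Chars.isalpha a = false := by simpa using hA
        have hnp : [PySem.Chars.lowerChar x, PySem.Chars.lowerChar a] ∉ pvELEMENTS := by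
          intro hmem
          have := pair_mem_alpha hmem
          rw [lower_nonalpha a hda hA'] at this
          simp [hA'] at this
        have step : aStep ((c ++ [bCell x]) ++ [a] :: rest.map fun b => [b], [PySem.Chars.lowerChar x]) ((c.length : Int) + 1, [a])
            = (((c ++ [bCell x]) ++ [[a]]) ++ rest.map fun b => [b], []) := by
          simp [aStep, PySem.Chars.strIsalpha, hA']
        rw [step]
        have := ih ((c ++ [bCell x]) ++ [[a]]) none ((c.length : Int) + 1 + 1) (by simp) hdrest (by simp only [List.length_append, List.length_cons, List.length_nil, Option.elim_none, Option.elim_some]; push_cast; omega)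
        simp only [Option.elim_none, Option.elim_some, List.append_nil] at this
        rw [this]
        simp [bGo, hXa, hnp, bGo_nonalpha a rest hA']

-- ===== VERDICT (by name: the statement is the Claim_ definition above) =====
theorem enrich_word_py_spec : Claim_equal_enrich_word_py := by
  intro word hdom
  unfold Spec_enrich_word_py enrich_word_py enrich_word_py_alt
  have hd : ∀ a ∈ word.toList, pvDomChar a = true := by
    simpa [Dom_enrich_word_py, pvDomStr, List.all_eq_true] using hdom
  have h := run_main word.toList [] none 0 (by simp) hd (by simp)
  simp only [Option.elim_none, List.append_nil, List.nil_append, List.flatten_nil] at h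
  exact congrArg String.ofList h
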